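-- pv_equiv track=rewrite | github.com/wan-elmus/Algos | Q2.py | hire_counselors
-- ===== SOURCE A (Python) =====
-- from itertools import combinations
--
-- def hire_counselors(n, m, qualifications, k):
--     for comb in combinations(range(m), k):
--         sports_covered = set(range(n))
--         for applicant in comb:
--             sports_covered &= set(i for i, qualified in enumerate(qualifications[applicant]) if qualified)
--             if not sports_covered:
--                 break
--         if sports_covered:
--             return True
--     return False
-- ===== SOURCE B (Python) =====
-- def hire_counselors(n, m, qualifications, k):
--     # Count, per sport, how many applicants are qualified; k applicants
--     # covering a common sport exist iff some sport has >= k qualified applicants.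
--     if k <= 0:
--         return n > 0
--     counts = {}
--     for a in range(m):
--         for i, q in enumerate(qualifications[a]):
--             if q and i < n:
--                 counts[i] = counts.get(i, 0) + 1
--     return any(c >= k for c in counts.values())
-- ===== Notes on version B (the rewrite author's own statement) =====
-- stated objective: alternative
-- what changed: Instead of enumerating all C(m,k) applicant combinations and intersecting their sport sets, B counts per sport how many applicants are qualified (one pass over the qualification rows) and returns True iff some sport has at least k qualified applicants (k<=0 trivially needs only some sport to exist).
-- outside the precondition, e.g. on hire_counselors(1, 2, [[True]], 1): A returns True, B raises IndexError; on hire_counselors(1, 5, [], 7): A returns False, B raises IndexError; on hire_counselors(1, 1, [[True]], -1): A raises ValueError, B returns True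
import Mathlib
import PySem

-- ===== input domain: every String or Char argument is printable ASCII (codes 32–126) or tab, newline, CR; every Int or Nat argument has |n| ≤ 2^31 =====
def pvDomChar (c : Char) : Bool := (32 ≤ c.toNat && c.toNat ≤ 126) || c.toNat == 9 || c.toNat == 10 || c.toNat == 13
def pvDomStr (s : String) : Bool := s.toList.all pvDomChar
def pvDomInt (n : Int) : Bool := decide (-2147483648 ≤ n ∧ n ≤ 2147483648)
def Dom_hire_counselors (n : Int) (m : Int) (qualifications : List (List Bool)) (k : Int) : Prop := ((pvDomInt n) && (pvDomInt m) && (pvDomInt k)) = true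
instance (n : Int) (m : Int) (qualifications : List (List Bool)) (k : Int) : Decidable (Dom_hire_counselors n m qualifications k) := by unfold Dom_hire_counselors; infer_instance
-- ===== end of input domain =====

-- B replaces A's enumeration of all C(m,k) applicant combinations by a per-sport count
-- of qualified applicants (True iff some sport has ≥ k). Return value only; no mutation.

-- ===== PORT A =====
-- set(i for i, qualified in enumerate(qualifications[applicant]) if qualified)
def pvQualSet (row : List Bool) : PySem.Set Int :=
  PySem.Set.ofList (((PySem.List.enumerate row 0).filter (fun p => p.2)).map (fun p => p.1))

-- the inner 'for applicant in comb' loop with its early break; returns truthiness of sports_covered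
def pvInner (quals : List (List Bool)) : List Int → PySem.Set Int → Bool
  | [], sc => !sc.isEmpty
  | a :: rest, sc =>
      let sc' := PySem.Set.inter sc (pvQualSet ((PySem.List.pyGet? quals a).getD []))
      if sc'.isEmpty then false else pvInner quals rest sc'

-- itertools.combinations(xs, k), in Python's order
def pvCombos : List Int → Nat → List (List Int)
  | _, 0 => [[]]
  | [], _ + 1 => []
  | x :: xs, kk + 1 => ((pvCombos xs kk).map (fun c => x :: c)) ++ pvCombos xs (kk + 1)

-- sports_covered = set(range(n)): range(n) is duplicate-free, so this Set is the range list itself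
def hire_counselors (n : Int) (m : Int) (qualifications : List (List Bool)) (k : Int) : Bool :=
  (pvCombos (PySem.List.pyRange 0 m 1) k.toNat).any
    (fun comb => pvInner qualifications comb (PySem.List.pyRange 0 n 1))

-- ===== PORT B =====
-- the inner 'for i, q in enumerate(qualifications[a]): if q and i < n: counts[i] = counts.get(i, 0) + 1'
def pvBump (n : Int) (d : PySem.Dict Int Int) (row : List Bool) : PySem.Dict Int Int :=
  (PySem.List.enumerate row 0).foldl
    (fun d2 p => if p.2 && decide (p.1 < n) then d2.insert p.1 (d2.getD p.1 0 + 1) else d2) d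

def hire_counselors_alt (n : Int) (m : Int) (qualifications : List (List Bool)) (k : Int) : Bool :=
  if k ≤ 0 then decide (0 < n)
  else
    let counts := (PySem.List.pyRange 0 m 1).foldl
      (fun d a => pvBump n d ((PySem.List.pyGet? qualifications a).getD [])) PySem.Dict.empty
    counts.values.any (fun c => decide (k ≤ c))

-- ===== PRECONDITION & SPEC =====
-- Pre_ excludes k < 0 (A raises ValueError from combinations) and m > len(qualifications)
-- (A indexes qualifications[a] for a in range(m) and raises IndexError on most such inputs;
-- on the corners where A returns before indexing out of range, B itself raises — see cites).
def Pre_hire_counselors (n : Int) (m : Int) (qualifications : List (List Bool)) (k : Int) : Prop :=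
  0 ≤ k ∧ m ≤ (qualifications.length : Int)
instance (n : Int) (m : Int) (qualifications : List (List Bool)) (k : Int) : Decidable (Pre_hire_counselors n m qualifications k) := by unfold Pre_hire_counselors; infer_instance

def pvWitness_hire_counselors : Int × Int × List (List Bool) × Int :=
  (2, 2, [[true, false], [true, true]], 2)

def Spec_hire_counselors (n : Int) (m : Int) (qualifications : List (List Bool)) (k : Int) (out : Bool) : Prop := out = hire_counselors_alt n m qualifications k
instance (n : Int) (m : Int) (qualifications : List (List Bool)) (k : Int) (out : Bool) : Decidable (Spec_hire_counselors n m qualifications k out) := by unfold Spec_hire_counselors; infer_instance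

-- ===== CLAIM (what is proved, stated in full; the proofs are below) =====
def Claim_equal_hire_counselors : Prop := ∀ (n : Int) (m : Int) (qualifications : List (List Bool)) (k : Int), Dom_hire_counselors n m qualifications k → Pre_hire_counselors n m qualifications k → Spec_hire_counselors n m qualifications k (hire_counselors n m qualifications k)

-- ===== LEMMAS AND PROOFS =====

-- A's qualification test for applicant a and sport s
def pvQA (quals : List (List Bool)) (a s : Int) : Bool :=
  (pvQualSet ((PySem.List.pyGet? quals a).getD [])).contains s

-- B's qualification test (row bound and value), without the s < n constraint
def pvQB (quals : List (List Bool)) (a s : Int) : Bool :=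
  let row := (PySem.List.pyGet? quals a).getD []
  decide (s < (row.length : Int)) && ((PySem.List.pyGet? row s).getD false)

-- the sport indices one row contributes to the counter
def pvKeysOf (n : Int) (row : List Bool) : List Int :=
  ((PySem.List.enumerate row 0).filter (fun p => p.2 && decide (p.1 < n))).map (fun p => p.1)

-- the multiset of all contributed sport indices
def pvAllKeys (n : Int) (m : Int) (quals : List (List Bool)) : List Int :=
  (PySem.List.pyRange 0 m 1).flatMap (fun a => pvKeysOf n ((PySem.List.pyGet? quals a).getD []))

lemma pvQA_eq_pvQB (quals : List (List Bool)) (a s : Int) (hs : 0 ≤ s) :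
    pvQA quals a s = pvQB quals a s := by
  unfold pvQA pvQB pvQualSet
  set row := (PySem.List.pyGet? quals a).getD [] with hrow
  rw [Bool.eq_iff_iff]
  simp [PySem.Set.mem_ofList, PySem.List.mem_enumerate_iff]
  constructor
  · rintro ⟨kk, rfl, hk, hq⟩
    refine ⟨by exact_mod_cast hk, ?_⟩
    rw [PySem.List.pyGet?_natCast]
    simp [hk, hq]
  · rintro ⟨h1, h2⟩
    have hk : s.toNat < row.length := by omega
    refine ⟨s.toNat, by omega, hk, ?_⟩
    rw [show s = (s.toNat : Int) by omega, PySem.List.pyGet?_natCast] at h2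
    simpa [hk] using h2

-- early-break loop = filter by "all applicants qualified"
lemma pvInner_eq (quals : List (List Bool)) (comb : List Int) (sc : PySem.Set Int) :
    pvInner quals comb sc
      = !(sc.filter (fun s => comb.all (fun a => pvQA quals a s))).isEmpty := by
  induction comb generalizing sc with
  | nil => simp [pvInner]
  | cons a rest ih =>
    show (if (PySem.Set.inter sc (pvQualSet ((PySem.List.pyGet? quals a).getD []))).isEmpty
          then false
          else pvInner quals rest (PySem.Set.inter sc (pvQualSet ((PySem.List.pyGet? quals a).getD [])))) = _
    have hint : PySem.Set.inter sc (pvQualSet ((PySem.List.pyGet? quals a).getD []))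
        = sc.filter (fun s => pvQA quals a s) := rfl
    have hff : (sc.filter (fun s => pvQA quals a s)).filter (fun s => rest.all (fun b => pvQA quals b s))
        = sc.filter (fun s => (a :: rest).all (fun b => pvQA quals b s)) := by
      rw [List.filter_filter]
      exact List.filter_congr (fun x _ => by simp [Bool.and_comm])
    rw [hint]
    by_cases h : (sc.filter (fun s => pvQA quals a s)).isEmpty
    · simp only [h, if_true]
      rw [← hff]
      rw [List.isEmpty_iff] at h
      simp [h]
    · simp [h, ih, hff]

-- combinations lemma: some k-combination all-satisfies P iff at least k elements satisfy P
lemma pvCombos_any (xs : List Int) (kk : Nat) (P : Int → Bool) :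
    (pvCombos xs kk).any (fun c => c.all P) = decide (kk ≤ (xs.filter P).length) := by
  induction xs generalizing kk with
  | nil => cases kk <;> simp [pvCombos]
  | cons x xs ih =>
    cases kk with
    | zero => simp [pvCombos]
    | succ kk =>
      rw [Bool.eq_iff_iff]
      by_cases h : P x = true <;>
        simp [pvCombos, Function.comp_def, h, ih] <;> omega

-- characterisation of A: some sport s < n is shared by at least k applicants
lemma pvA_char (n : Int) (m : Int) (quals : List (List Bool)) (k : Int) :
    hire_counselors n m quals k = true
      ↔ ∃ s ∈ PySem.List.pyRange 0 n 1,
          k.toNat ≤ ((PySem.List.pyRange 0 m 1).filter (fun a => pvQA quals a s)).length := by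
  unfold hire_counselors
  simp only [List.any_eq_true, pvInner_eq, Bool.not_eq_true', List.isEmpty_eq_false_iff_exists_mem]
  constructor
  · rintro ⟨comb, hc, s, hsf⟩
    rw [List.mem_filter] at hsf
    obtain ⟨hssc, hall⟩ := hsf
    refine ⟨s, hssc, ?_⟩
    have hany : (pvCombos (PySem.List.pyRange 0 m 1) k.toNat).any
        (fun c => c.all (fun a => pvQA quals a s)) = true :=
      List.any_eq_true.mpr ⟨comb, hc, hall⟩
    rw [pvCombos_any, decide_eq_true_eq] at hany
    exact hany
  · rintro ⟨s, hssc, hlen⟩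
    have hany : (pvCombos (PySem.List.pyRange 0 m 1) k.toNat).any
        (fun c => c.all (fun a => pvQA quals a s)) = true := by
      rw [pvCombos_any, decide_eq_true_eq]; exact hlen
    obtain ⟨comb, hc, hall⟩ := List.any_eq_true.mp hany
    exact ⟨comb, hc, s, List.mem_filter.mpr ⟨hssc, hall⟩⟩

-- a fold with a guarded counting insert = the plain counting fold over the selected keys
lemma pvFold_guard (n : Int) (l : List (Int × Bool)) (d : PySem.Dict Int Int) :
    l.foldl (fun d2 p => if p.2 && decide (p.1 < n) then d2.insert p.1 (d2.getD p.1 0 + 1) else d2) d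
      = ((l.filter (fun p => p.2 && decide (p.1 < n))).map (fun p => p.1)).foldl
          (fun d2 x => d2.insert x (d2.getD x 0 + 1)) d := by
  induction l generalizing d with
  | nil => rfl
  | cons p l ih =>
    rw [List.foldl_cons, List.filter_cons]
    by_cases h : (p.2 && decide (p.1 < n)) = true
    · rw [if_pos h, if_pos h, List.map_cons, List.foldl_cons, ih]
    · rw [if_neg h, if_neg h, ih]

-- a fold of row-folds = one fold over the concatenation of the rows' keys
lemma pvFold_flat (g : Int → List Int) (l : List Int) (d : PySem.Dict Int Int) :
    l.foldl (fun d a => (g a).foldl (fun d2 x => d2.insert x (d2.getD x 0 + 1)) d) d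
      = (l.flatMap g).foldl (fun d2 x => d2.insert x (d2.getD x 0 + 1)) d := by
  induction l generalizing d with
  | nil => rfl
  | cons a l ih => simp [List.flatMap_cons, List.foldl_append, ih]

-- the counts dict built by B is Counter(all contributed keys)
lemma pvCounts_eq_counter (n : Int) (m : Int) (quals : List (List Bool)) :
    (PySem.List.pyRange 0 m 1).foldl
        (fun d a => pvBump n d ((PySem.List.pyGet? quals a).getD [])) PySem.Dict.empty
      = PySem.Dict.counter (pvAllKeys n m quals) := by
  have hb : (fun (d : PySem.Dict Int Int) (a : Int) => pvBump n d ((PySem.List.pyGet? quals a).getD []))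
      = (fun d a => (pvKeysOf n ((PySem.List.pyGet? quals a).getD [])).foldl
          (fun d2 x => d2.insert x (d2.getD x 0 + 1)) d) :=
    funext fun d => funext fun a => pvFold_guard n _ d
  unfold pvAllKeys
  rw [hb, pvFold_flat, PySem.Dict.foldl_insert_getD_add_one_eq_counter]

lemma pvKeysOf_nodup (n : Int) (row : List Bool) : (pvKeysOf n row).Nodup := by
  unfold pvKeysOf
  have h1 : ((PySem.List.enumerate row 0).filter (fun p => p.2 && decide (p.1 < n))).Pairwise
      (fun p q => p.1 < q.1) :=
    List.Pairwise.filter _ (PySem.List.pairwise_lt_enumerate row 0)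
  exact (List.pairwise_map.mpr (h1.imp (fun h => Int.ne_of_lt h)))

lemma pvMem_keysOf (n : Int) (row : List Bool) (s : Int) :
    s ∈ pvKeysOf n row
      ↔ (0 ≤ s ∧ s < n ∧ (decide (s < (row.length : Int)) && ((PySem.List.pyGet? row s).getD false)) = true) := by
  unfold pvKeysOf
  simp [PySem.List.mem_enumerate_iff]
  constructor
  · rintro ⟨kk, rfl, ⟨hk, hq⟩, hn⟩
    refine ⟨by omega, hn, by exact_mod_cast hk, ?_⟩
    rw [PySem.List.pyGet?_natCast]
    simp [hk, hq]
  · rintro ⟨hs0, hsn, h1, h2⟩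
    have hk : s.toNat < row.length := by omega
    refine ⟨s.toNat, by omega, ⟨hk, ?_⟩, by omega⟩
    rw [show s = (s.toNat : Int) by omega, PySem.List.pyGet?_natCast] at h2
    simpa [hk] using h2

-- how often a sport occurs among all contributed keys = how many applicants are qualified at it
lemma pvCount_allKeys (n : Int) (m : Int) (quals : List (List Bool)) (s : Int) :
    (pvAllKeys n m quals).count s
      = ((PySem.List.pyRange 0 m 1).filter
          (fun a => decide (s ∈ pvKeysOf n ((PySem.List.pyGet? quals a).getD [])))).length := by
  unfold pvAllKeys
  induction PySem.List.pyRange 0 m 1 with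
  | nil => rfl
  | cons a l ih =>
    rw [List.flatMap_cons, List.count_append, List.filter_cons, ih]
    by_cases h : s ∈ pvKeysOf n ((PySem.List.pyGet? quals a).getD [])
    · rw [List.count_eq_one_of_mem (pvKeysOf_nodup _ _) h]
      simp [h]
      omega
    · rw [List.count_eq_zero_of_not_mem h]
      simp [h]

-- characterisation of B for k ≥ 1
lemma pvB_char (n : Int) (m : Int) (quals : List (List Bool)) (k : Int) (hk1 : 1 ≤ k) :
    hire_counselors_alt n m quals k = true
      ↔ ∃ s ∈ PySem.List.pyRange 0 n 1,
          k ≤ (((PySem.List.pyRange 0 m 1).filter (fun a => pvQB quals a s)).length : Int) := by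
  unfold hire_counselors_alt
  rw [if_neg (by omega)]
  rw [pvCounts_eq_counter]
  show ((PySem.Dict.counter (pvAllKeys n m quals)).values.any fun c => decide (k ≤ c)) = true ↔ _
  have hvals : (PySem.Dict.counter (pvAllKeys n m quals)).values
      = (PySem.Set.ofList (pvAllKeys n m quals)).map
          (fun s => ((pvAllKeys n m quals).count s : Int)) := by
    show ((PySem.Dict.counter (pvAllKeys n m quals)).items).map (fun p => p.2) = _
    rw [PySem.Dict.items_counter]
    simp
  rw [hvals]
  simp only [List.any_eq_true, List.mem_map, decide_eq_true_eq]
  constructor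
  · rintro ⟨c, ⟨s, hsmem, rfl⟩, hc⟩
    rw [PySem.Set.mem_ofList] at hsmem
    obtain ⟨a, -, hsk⟩ := List.mem_flatMap.mp hsmem
    obtain ⟨hs0, hsn, hq⟩ := (pvMem_keysOf _ _ _).mp hsk
    refine ⟨s, PySem.List.mem_pyRange_one.mpr ⟨hs0, hsn⟩, ?_⟩
    rw [pvCount_allKeys] at hc
    have hfe : (PySem.List.pyRange 0 m 1).filter
          (fun a => decide (s ∈ pvKeysOf n ((PySem.List.pyGet? quals a).getD [])))
        = (PySem.List.pyRange 0 m 1).filter (fun a => pvQB quals a s) := by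
      refine List.filter_congr (fun a _ => ?_)
      rw [Bool.eq_iff_iff]
      simp only [decide_eq_true_eq, pvMem_keysOf, pvQB]
      constructor
      · rintro ⟨-, -, h⟩; exact h
      · intro h; exact ⟨hs0, hsn, h⟩
    rw [hfe] at hc
    exact hc
  · rintro ⟨s, hsr, hlen⟩
    obtain ⟨hs0, hsn⟩ := PySem.List.mem_pyRange_one.mp hsr
    have hfe : (PySem.List.pyRange 0 m 1).filter (fun a => pvQB quals a s)
        = (PySem.List.pyRange 0 m 1).filter
            (fun a => decide (s ∈ pvKeysOf n ((PySem.List.pyGet? quals a).getD []))) := by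
      refine List.filter_congr (fun a _ => ?_)
      rw [Bool.eq_iff_iff]
      simp only [decide_eq_true_eq, pvMem_keysOf, pvQB]
      constructor
      · intro h; exact ⟨hs0, hsn, h⟩
      · rintro ⟨-, -, h⟩; exact h
    rw [hfe] at hlen
    have hpos : 0 < (pvAllKeys n m quals).count s := by
      rw [pvCount_allKeys]; omega
    refine ⟨((pvAllKeys n m quals).count s : Int),
      ⟨s, by rw [PySem.Set.mem_ofList]; exact List.count_pos_iff.mp hpos, rfl⟩, ?_⟩
    rw [pvCount_allKeys]
    omega

-- ===== VERDICT (by name: the statement is the Claim_ definition above) =====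
theorem hire_counselors_spec : Claim_equal_hire_counselors := by
  intro n m quals k _ hpre
  obtain ⟨hk, -⟩ := hpre
  unfold Spec_hire_counselors
  rw [Bool.eq_iff_iff, pvA_char]
  by_cases hk0 : k ≤ 0
  · have hkz : k = 0 := le_antisymm hk0 hk
    subst hkz
    unfold hire_counselors_alt
    rw [if_pos (by omega), decide_eq_true_eq]
    constructor
    · rintro ⟨s, hs, -⟩
      have h := PySem.List.mem_pyRange_one.mp hs
      omega
    · intro hn
      exact ⟨0, PySem.List.mem_pyRange_one.mpr ⟨le_refl 0, hn⟩, by simp⟩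
  · rw [pvB_char n m quals k (by omega)]
    constructor
    · rintro ⟨s, hs, hlen⟩
      have hs0 : 0 ≤ s := (PySem.List.mem_pyRange_one.mp hs).1
      refine ⟨s, hs, ?_⟩
      rw [← List.filter_congr (fun a _ => pvQA_eq_pvQB quals a s hs0)]
      omega
    · rintro ⟨s, hs, hlen⟩
      have hs0 : 0 ≤ s := (PySem.List.mem_pyRange_one.mp hs).1
      refine ⟨s, hs, ?_⟩
      rw [← List.filter_congr (fun a _ => pvQA_eq_pvQB quals a s hs0)] at hlen
      omega
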